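-- pv_equiv track=rewrite | github.com/shreyas12official/test | 2454-largest-local-values-in-a-matrix/largest-local-values-in-a-matrix.py | largestLocal
-- ===== SOURCE A (Python) =====
-- from typing import List
--
-- def largestLocal(grid: List[List[int]]) -> List[List[int]]:
--     b = len(grid)
--     c = []
--     for i in range(b - 2):
--         d = []
--         for j in range(b - 2):
--             e = 0
--             for x in range(i, i + 3):
--                 for y in range(j, j + 3):
--                     e = max(e, grid[x][y])
--             d.append(e)
--         c.append(d)
--     return c
-- ===== SOURCE B (Python) =====
-- def largestLocal(grid):
--     n = len(grid)
--     rows = [[max(0, row[j], row[j + 1], row[j + 2]) for j in range(n - 2)]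
--             for row in grid]
--     return [[max(rows[i][j], rows[i + 1][j], rows[i + 2][j])
--              for j in range(n - 2)]
--             for i in range(n - 2)]
-- ===== Notes on version B (the rewrite author's own statement) =====
-- stated objective: faster
-- what changed: Replaces the 9-lookup 3x3 nested scan per cell with a separable sliding-window max: a horizontal pass building a row-window-max table (accumulators initialized at 0, preserving A's clip-at-0), then a vertical width-3 pass over that table — 3+3 lookups per cell and no inner double loop.
import Mathlib
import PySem

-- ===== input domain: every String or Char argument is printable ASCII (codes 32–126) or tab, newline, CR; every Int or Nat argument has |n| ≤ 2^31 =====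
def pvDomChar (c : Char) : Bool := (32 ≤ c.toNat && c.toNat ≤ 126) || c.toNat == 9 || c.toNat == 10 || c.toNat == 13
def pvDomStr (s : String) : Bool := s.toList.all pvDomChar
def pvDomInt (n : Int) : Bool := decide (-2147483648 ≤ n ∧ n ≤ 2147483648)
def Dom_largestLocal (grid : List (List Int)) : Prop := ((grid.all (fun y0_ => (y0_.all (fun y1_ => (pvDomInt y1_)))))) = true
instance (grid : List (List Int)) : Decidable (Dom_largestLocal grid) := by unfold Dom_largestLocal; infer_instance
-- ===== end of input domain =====

-- B replaces A's 3x3 nested scan with a separable sliding-window max (horizontal pass into a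
-- row-window table, then a vertical width-3 pass); same values, alternative decomposition.

-- ===== PORT A =====
-- grid[x][y] (both indices are in range under Pre_)
def pvGet2 (grid : List (List Int)) (x y : Int) : Int :=
  PySem.List.pyGetD (PySem.List.pyGetD grid x []) y 0

def largestLocal (grid : List (List Int)) : List (List Int) :=
  let b : Int := grid.length
  (PySem.List.pyRange 0 (b - 2) 1).foldl (fun c i =>
    c ++ [(PySem.List.pyRange 0 (b - 2) 1).foldl (fun d j =>
      d ++ [(PySem.List.pyRange i (i + 3) 1).foldl (fun e x =>
        (PySem.List.pyRange j (j + 3) 1).foldl (fun e y => max e (pvGet2 grid x y)) e) 0]) []]) []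

-- ===== PORT B =====
def largestLocal_alt (grid : List (List Int)) : List (List Int) :=
  let n : Int := grid.length
  let rows : List (List Int) := grid.map (fun row =>
    (PySem.List.pyRange 0 (n - 2) 1).map (fun j =>
      max (max (max 0 (PySem.List.pyGetD row j 0)) (PySem.List.pyGetD row (j + 1) 0))
          (PySem.List.pyGetD row (j + 2) 0)))
  (PySem.List.pyRange 0 (n - 2) 1).map (fun i =>
    (PySem.List.pyRange 0 (n - 2) 1).map (fun j =>
      max (max (PySem.List.pyGetD (PySem.List.pyGetD rows i []) j 0)
               (PySem.List.pyGetD (PySem.List.pyGetD rows (i + 1) []) j 0))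
          (PySem.List.pyGetD (PySem.List.pyGetD rows (i + 2) []) j 0)))

-- ===== PRECONDITION & SPEC =====
-- Pre_ excludes non-square-enough inputs: with more than 2 rows, A indexes grid[x][y] for
-- y up to len(grid)-1 and raises IndexError when some row is shorter than len(grid).
def Pre_largestLocal (grid : List (List Int)) : Prop :=
  grid.length ≤ 2 ∨ ∀ row ∈ grid, grid.length ≤ row.length
instance (grid : List (List Int)) : Decidable (Pre_largestLocal grid) := by
  unfold Pre_largestLocal; infer_instance
def pvWitness_largestLocal : List (List Int) := [[1, 2, 3], [4, 5, 6], [7, 8, 9]]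

def Spec_largestLocal (grid : List (List Int)) (out : List (List Int)) : Prop := out = largestLocal_alt grid
instance (grid : List (List Int)) (out : List (List Int)) : Decidable (Spec_largestLocal grid out) := by unfold Spec_largestLocal; infer_instance

-- ===== CLAIM (what is proved, stated in full; the proofs are below) =====
def Claim_equal_largestLocal : Prop := ∀ (grid : List (List Int)), Dom_largestLocal grid → Pre_largestLocal grid → Spec_largestLocal grid (largestLocal grid)

-- ===== LEMMAS AND PROOFS =====
theorem pvRange3 (i : Int) : PySem.List.pyRange i (i + 3) 1 = [i, i + 1, i + 2] := by
  rw [PySem.List.pyRange_one_cons (by omega), PySem.List.pyRange_one_cons (by omega),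
      PySem.List.pyRange_one_cons (by omega), PySem.List.pyRange_one_eq_nil (by omega)]
  norm_num
  omega

theorem pvB0 (x y : Int) : max x (max 0 y) = max 0 (max x y) := max_left_comm x 0 y

theorem pvZ0 (z : Int) : max (0:Int) (max 0 z) = max 0 z := by rw [← max_assoc, max_self]

-- ===== VERDICT (by name: the statement is the Claim_ definition above) =====
theorem largestLocal_spec : Claim_equal_largestLocal := by
  intro grid _ hpre
  unfold Spec_largestLocal largestLocal largestLocal_alt
  simp only [PySem.List.foldl_append_singleton_eq_map, List.nil_append]
  apply List.map_congr_left
  intro i hi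
  apply List.map_congr_left
  intro j hj
  rw [PySem.List.mem_pyRange_one] at hi hj
  have hlen : (2 : Int) < grid.length := by omega
  have hrowlen : ∀ row ∈ grid, grid.length ≤ row.length := by
    rcases hpre with h | h
    · omega
    · exact h
  -- resolve A's grid[x][y] for an in-range row index x
  have hA : ∀ (x : Int) (hx0 : 0 ≤ x) (hx1 : x < (grid.length : Int)), ∀ y : Int,
      pvGet2 grid x y = PySem.List.pyGetD (grid[x.toNat]'(by omega)) y 0 := by
    intro x hx0 hx1 y
    unfold pvGet2
    rw [PySem.List.pyGetD_eq_getElem grid [] hx0 (by simpa using hx1)]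
  -- resolve B's rows[x][j] for an in-range row index x
  have hB : ∀ (x : Int) (hx0 : 0 ≤ x) (hx1 : x < (grid.length : Int)),
      PySem.List.pyGetD (PySem.List.pyGetD (grid.map (fun row =>
        (PySem.List.pyRange 0 ((grid.length : Int) - 2) 1).map (fun j =>
          max (max (max 0 (PySem.List.pyGetD row j 0)) (PySem.List.pyGetD row (j + 1) 0))
              (PySem.List.pyGetD row (j + 2) 0)))) x []) j 0 =
      max (max (max 0 (PySem.List.pyGetD (grid[x.toNat]'(by omega)) j 0))
          (PySem.List.pyGetD (grid[x.toNat]'(by omega)) (j + 1) 0))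
        (PySem.List.pyGetD (grid[x.toNat]'(by omega)) (j + 2) 0) := by
    intro x hx0 hx1
    rw [PySem.List.pyGetD_eq_getElem _ [] hx0 (by simpa using hx1)]
    rw [List.getElem_map]
    rw [PySem.List.pyGetD_map_pyRange_of_nonneg _ _ _ _ hj.1 hj.2]
  rw [pvRange3 i, pvRange3 j]
  simp only [List.foldl]
  rw [hA i (by omega) (by omega), hA i (by omega) (by omega), hA i (by omega) (by omega),
      hA (i+1) (by omega) (by omega), hA (i+1) (by omega) (by omega), hA (i+1) (by omega) (by omega),
      hA (i+2) (by omega) (by omega), hA (i+2) (by omega) (by omega), hA (i+2) (by omega) (by omega),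
      hB i (by omega) (by omega), hB (i+1) (by omega) (by omega), hB (i+2) (by omega) (by omega)]
  simp only [max_assoc, pvZ0, pvB0]
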